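-- pv_equiv track=rewrite | github.com/whyj107/Algorithm | CodeWar/20201125_Simple directions reversal.py | solve
-- ===== SOURCE A (Python) =====
-- def solve(arr):
--     answer = []
--     dic = {'Left': 'Right on ', 'Right': 'Left on ', '': 'Begin on '}
--     pre = ''
--     for i in range(len(arr)-1, -1, -1):
--         tmp = arr[i].split(' on ')
--         answer.append(dic[pre]+tmp[1])
--         pre = tmp[0]
--     return answer
-- ===== SOURCE B (Python) =====
-- def solve(arr):
--     if not arr:
--         return []
--     labels = {'Left': 'Right on ', 'Right': 'Left on ', '': 'Begin on '}
--     place = arr[0].split(' on ')[1]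
--     nxt = arr[1].split(' on ')[0] if len(arr) > 1 else ''
--     return solve(arr[1:]) + [labels[nxt] + place]
-- ===== Notes on version B (the rewrite author's own statement) =====
-- stated objective: alternative
-- what changed: Replaced A's backward indexed loop with a loop-carried `pre` state by a head-peeling structural recursion: the result for x::rest is solve(rest) followed by the element for x, whose label comes from rest's first direction (or '' when rest is empty), so no index arithmetic and no carried state.
-- outside the precondition, e.g. on solve(['Begin']): A raises IndexError, B raises IndexError; on solve(['A on X', 'B on Y']): A raises KeyError, B raises KeyError
import Mathlib
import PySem

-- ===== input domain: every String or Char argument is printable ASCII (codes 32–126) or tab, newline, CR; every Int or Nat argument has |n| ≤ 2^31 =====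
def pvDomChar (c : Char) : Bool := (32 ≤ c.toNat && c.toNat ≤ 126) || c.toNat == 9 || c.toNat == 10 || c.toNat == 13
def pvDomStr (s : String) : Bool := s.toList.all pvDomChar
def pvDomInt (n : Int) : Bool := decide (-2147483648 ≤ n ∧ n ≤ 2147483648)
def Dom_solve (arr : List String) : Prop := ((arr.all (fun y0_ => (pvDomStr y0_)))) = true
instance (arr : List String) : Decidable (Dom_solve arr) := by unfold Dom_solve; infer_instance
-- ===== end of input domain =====

-- B replaces A's backward indexed loop with carried `pre` state by a head-peeling structural
-- recursion (result for x::rest = solve rest ++ [element for x]); objective: alternative decomposition.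

-- ===== PORT A =====
def solve (arr : List String) : List String :=
  let dic : PySem.Dict String String :=
    PySem.Dict.ofList [("Left", "Right on "), ("Right", "Left on "), ("", "Begin on ")]
  ((PySem.List.pyRange ((arr.length : Int) - 1) (-1) (-1)).foldl
    (fun (st : List String × String) i =>
      let tmp := (PySem.Str.split? (PySem.List.pyGetD arr i "") " on ").getD []
      (st.1 ++ [(dic.get? st.2).getD "" ++ PySem.List.pyGetD tmp 1 ""],
       PySem.List.pyGetD tmp 0 ""))
    ([], "")).1

-- ===== PORT B =====
def solve_alt (arr : List String) : List String :=
  match arr with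
  | [] => []
  | x :: xs =>
    let labels : PySem.Dict String String :=
      PySem.Dict.ofList [("Left", "Right on "), ("Right", "Left on "), ("", "Begin on ")]
    let place := PySem.List.pyGetD ((PySem.Str.split? x " on ").getD []) 1 ""
    let nxt : String :=
      match xs with
      | [] => ""
      | y :: _ => PySem.List.pyGetD ((PySem.Str.split? y " on ").getD []) 0 ""
    solve_alt xs ++ [(labels.get? nxt).getD "" ++ place]

-- ===== PRECONDITION & SPEC =====
-- Pre_ excludes exactly the inputs on which Python A raises: an element without ' on '
-- (IndexError on tmp[1]) or a non-first element whose direction is not a dict key (KeyError).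
def Pre_solve (arr : List String) : Prop :=
  (∀ s ∈ arr, 2 ≤ ((PySem.Str.split? s " on ").getD []).length) ∧
  (∀ s ∈ arr.drop 1,
    PySem.List.pyGetD ((PySem.Str.split? s " on ").getD []) 0 "" ∈ (["Left", "Right", ""] : List String))
instance (arr : List String) : Decidable (Pre_solve arr) := by unfold Pre_solve; infer_instance

def pvWitness_solve : List String := ["Begin on A St", "Right on B St", "Left on C St"]

def Spec_solve (arr : List String) (out : List String) : Prop := out = solve_alt arr
instance (arr : List String) (out : List String) : Decidable (Spec_solve arr out) := by unfold Spec_solve; infer_instance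

-- ===== CLAIM (what is proved, stated in full; the proofs are below) =====
def Claim_equal_solve : Prop := ∀ (arr : List String), Dom_solve arr → Pre_solve arr → Spec_solve arr (solve arr)

-- ===== LEMMAS AND PROOFS =====

def pvDir (s : String) : String := PySem.List.pyGetD ((PySem.Str.split? s " on ").getD []) 0 ""
def pvPlace (s : String) : String := PySem.List.pyGetD ((PySem.Str.split? s " on ").getD []) 1 ""
def pvLabel (d : String) : String :=
  ((PySem.Dict.ofList [("Left", "Right on "), ("Right", "Left on "), ("", "Begin on ")] : PySem.Dict String String).get? d).getD ""

-- the common intermediate form: each place paired with the next element's direction (or `pre` at the end)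
def pvBody (arr : List String) (pre : String) : List String :=
  ((((arr.map pvDir).drop 1 ++ [pre]).zip (arr.map pvPlace)).map (fun dp => pvLabel dp.1 ++ dp.2)).reverse

lemma pvBody_nil (pre : String) : pvBody [] pre = [] := by simp [pvBody]

lemma pvBody_snoc (xs : List String) (x : String) (pre : String) :
    pvBody (xs ++ [x]) pre = (pvLabel pre ++ pvPlace x) :: pvBody xs (pvDir x) := by
  cases xs with
  | nil => simp [pvBody]
  | cons y ys =>
      unfold pvBody
      rw [List.map_append, List.map_append]
      simp only [List.map_cons, List.map_nil, List.cons_append, List.drop_succ_cons,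
        List.drop_zero]
      rw [show pvPlace y :: (List.map pvPlace ys ++ [pvPlace x])
            = (pvPlace y :: List.map pvPlace ys) ++ [pvPlace x] by simp,
          List.zip_append (by simp)]
      simp [List.reverse_append]

lemma pvBody_cons (x : String) (xs : List String) :
    pvBody (x :: xs) "" =
      pvBody xs "" ++ [pvLabel (match xs with | [] => "" | y :: _ => pvDir y) ++ pvPlace x] := by
  cases xs with
  | nil => simp [pvBody]
  | cons y ys =>
      unfold pvBody
      simp [List.zip_cons_cons]

-- A's loop, with acc/pre generalized
lemma loopA_eq (arr : List String) : ∀ (acc : List String) (pre : String),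
    ((PySem.List.pyRange ((arr.length : Int) - 1) (-1) (-1)).foldl
      (fun (st : List String × String) i =>
        let tmp := (PySem.Str.split? (PySem.List.pyGetD arr i "") " on ").getD []
        (st.1 ++ [(((PySem.Dict.ofList [("Left", "Right on "), ("Right", "Left on "), ("", "Begin on ")] : PySem.Dict String String).get? st.2).getD "") ++ PySem.List.pyGetD tmp 1 ""],
         PySem.List.pyGetD tmp 0 ""))
      (acc, pre)).1 = acc ++ pvBody arr pre := by
  induction arr using List.reverseRecOn with
  | nil =>
      intro acc pre
      rw [PySem.List.pyRange_neg_one_eq_nil (by simp)]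
      simp [pvBody_nil]
  | append_singleton xs x ih =>
      intro acc pre
      have hlen : (((xs ++ [x]).length : Int)) - 1 = (xs.length : Int) := by simp
      rw [hlen, PySem.List.pyRange_neg_one_cons (by omega)]
      simp only [List.foldl_cons]
      have hx : PySem.List.pyGetD (xs ++ [x]) (xs.length : Int) "" = x := by
        rw [PySem.List.pyGetD_eq_getElem _ _ (by omega) (by simp)]
        simp
      rw [hx]
      rw [PySem.List.foldl_congr_mem _ _
        (fun (st : List String × String) i =>
          let tmp := (PySem.Str.split? (PySem.List.pyGetD xs i "") " on ").getD []
          (st.1 ++ [(((PySem.Dict.ofList [("Left", "Right on "), ("Right", "Left on "), ("", "Begin on ")] : PySem.Dict String String).get? st.2).getD "") ++ PySem.List.pyGetD tmp 1 ""],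
           PySem.List.pyGetD tmp 0 "")) _
        (by
          intro st i hi
          rw [PySem.List.mem_pyRange_neg_one] at hi
          have h0 : (0 : Int) ≤ i := by omega
          have h1 : i < (xs.length : Int) := by omega
          have hg : PySem.List.pyGetD (xs ++ [x]) i "" = PySem.List.pyGetD xs i "" := by
            rw [PySem.List.pyGetD_eq_getElem _ _ h0 (by simp; omega),
                PySem.List.pyGetD_eq_getElem _ _ h0 h1]
            exact List.getElem_append_left (by omega)
          simp only [hg])]
      rw [ih]
      rw [pvBody_snoc]
      simp [pvDir, pvPlace, pvLabel]

lemma solve_alt_eq_pvBody (arr : List String) : solve_alt arr = pvBody arr "" := by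
  induction arr with
  | nil => simp [solve_alt, pvBody_nil]
  | cons x xs ih =>
      rw [pvBody_cons, ← ih]
      cases xs <;> simp [solve_alt, pvDir, pvPlace, pvLabel]

-- ===== VERDICT (by name: the statement is the Claim_ definition above) =====
theorem solve_spec : Claim_equal_solve := by
  intro arr _ _
  unfold Spec_solve solve
  rw [solve_alt_eq_pvBody]
  simpa using loopA_eq arr [] ""
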